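-- pv_equiv track=rewrite | github.com/Hei-Lima/exercicioslogica | Fundamentos_de_Teoria_dos_Conjuntos/13.py | reflexive
-- ===== SOURCE A (Python) =====
-- def reflexive(l):
--     d = set()
--     i = set()
--     for (x, y) in l:
--         i.add(y)
--         if x == y:
--             d.add(x)
--     if d == i:
--         return "Reflexiva"
--     else:
--         return "Não Reflexiva"
-- ===== SOURCE B (Python) =====
-- def reflexive(l):
--     diag = {x for (x, y) in l if x == y}
--     return "Reflexiva" if all(y in diag for (x, y) in l) else "Não Reflexiva"
-- ===== Notes on version B (the rewrite author's own statement) =====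
-- stated objective: simpler
-- what changed: Builds only the diagonal set in one comprehension and replaces the two-set equality test (diagonal vs. all second components) with a single all()/membership verification pass over the pairs, exploiting that the diagonal set is always a subset of the second-component set.
import Mathlib
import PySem

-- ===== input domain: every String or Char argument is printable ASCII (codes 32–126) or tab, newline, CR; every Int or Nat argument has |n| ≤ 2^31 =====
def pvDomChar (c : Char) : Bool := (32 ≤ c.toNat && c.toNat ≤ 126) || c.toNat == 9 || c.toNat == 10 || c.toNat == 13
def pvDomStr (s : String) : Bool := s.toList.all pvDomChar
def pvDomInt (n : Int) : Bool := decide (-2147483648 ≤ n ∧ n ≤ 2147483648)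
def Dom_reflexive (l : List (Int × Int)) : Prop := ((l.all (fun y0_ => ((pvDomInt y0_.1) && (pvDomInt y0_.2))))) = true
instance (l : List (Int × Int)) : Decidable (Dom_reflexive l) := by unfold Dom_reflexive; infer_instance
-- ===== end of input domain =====

-- B is simpler: one diagonal set plus a membership verification pass, instead of two sets and a set-equality test.

-- ===== PORT A =====
-- builds d (diagonal elements) and i (all second components), then compares the two sets
def reflexive (l : List (Int × Int)) : String :=
  let di := l.foldl
    (fun (s : PySem.Set Int × PySem.Set Int) (p : Int × Int) =>
      let i' := PySem.Set.add s.2 p.2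
      let d' := if p.1 == p.2 then PySem.Set.add s.1 p.1 else s.1
      (d', i'))
    (PySem.Set.empty, PySem.Set.empty)
  if PySem.Set.equal di.1 di.2 then "Reflexiva" else "Não Reflexiva"

-- ===== PORT B =====
-- diag = {x for (x, y) in l if x == y}; then all(y in diag for (x, y) in l)
def reflexive_alt (l : List (Int × Int)) : String :=
  let diag : PySem.Set Int :=
    PySem.Set.ofList ((l.filter (fun p => p.1 == p.2)).map (fun p => p.1))
  if l.all (fun p => PySem.Set.contains diag p.2) then "Reflexiva" else "Não Reflexiva"

-- ===== PRECONDITION & SPEC =====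
def Spec_reflexive (l : List (Int × Int)) (out : String) : Prop := out = reflexive_alt l
instance (l : List (Int × Int)) (out : String) : Decidable (Spec_reflexive l out) := by unfold Spec_reflexive; infer_instance

-- ===== CLAIM (what is proved, stated in full; the proofs are below) =====
def Claim_equal_reflexive : Prop := ∀ (l : List (Int × Int)), Dom_reflexive l → Spec_reflexive l (reflexive l)

-- ===== LEMMAS AND PROOFS =====

-- membership in the two sets produced by A's loop
theorem mem_foldA (l : List (Int × Int)) (d0 i0 : PySem.Set Int) (x : Int) :
    (x ∈ (l.foldl
      (fun (s : PySem.Set Int × PySem.Set Int) (p : Int × Int) =>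
        let i' := PySem.Set.add s.2 p.2
        let d' := if p.1 == p.2 then PySem.Set.add s.1 p.1 else s.1
        (d', i'))
      (d0, i0)).1 ↔ x ∈ d0 ∨ ∃ p ∈ l, p.1 = p.2 ∧ x = p.1)
    ∧
    (x ∈ (l.foldl
      (fun (s : PySem.Set Int × PySem.Set Int) (p : Int × Int) =>
        let i' := PySem.Set.add s.2 p.2
        let d' := if p.1 == p.2 then PySem.Set.add s.1 p.1 else s.1
        (d', i'))
      (d0, i0)).2 ↔ x ∈ i0 ∨ ∃ p ∈ l, x = p.2) := by
  induction l generalizing d0 i0 with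
  | nil => simp
  | cons p t ih =>
    simp only [List.foldl_cons]
    constructor
    · rw [(ih _ _).1]
      by_cases h : p.1 = p.2
      · simp [h, PySem.Set.mem_add]
        tauto
      · simp [h]
    · rw [(ih _ _).2]
      simp [PySem.Set.mem_add]
      tauto

-- membership in B's diagonal set
theorem mem_diag (l : List (Int × Int)) (x : Int) :
    x ∈ PySem.Set.ofList ((l.filter (fun p => p.1 == p.2)).map (fun p => p.1)) ↔
      ∃ p ∈ l, p.1 = p.2 ∧ x = p.1 := by
  simp [PySem.Set.mem_ofList, List.mem_map, List.mem_filter]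

-- ===== VERDICT (by name: the statement is the Claim_ definition above) =====
theorem reflexive_spec : Claim_equal_reflexive := by
  intro l _
  unfold Spec_reflexive reflexive reflexive_alt
  simp only []
  have hA := fun x => mem_foldA l PySem.Set.empty PySem.Set.empty x
  have hd : ∀ x, (x ∈ (l.foldl
      (fun (s : PySem.Set Int × PySem.Set Int) (p : Int × Int) =>
        let i' := PySem.Set.add s.2 p.2
        let d' := if p.1 == p.2 then PySem.Set.add s.1 p.1 else s.1
        (d', i'))
      (PySem.Set.empty, PySem.Set.empty)).1 ↔ ∃ p ∈ l, p.1 = p.2 ∧ x = p.1) := by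
    intro x; rw [(hA x).1]; simp [PySem.Set.empty]
  have hi : ∀ x, (x ∈ (l.foldl
      (fun (s : PySem.Set Int × PySem.Set Int) (p : Int × Int) =>
        let i' := PySem.Set.add s.2 p.2
        let d' := if p.1 == p.2 then PySem.Set.add s.1 p.1 else s.1
        (d', i'))
      (PySem.Set.empty, PySem.Set.empty)).2 ↔ ∃ p ∈ l, x = p.2) := by
    intro x; rw [(hA x).2]; simp [PySem.Set.empty]
  have hcond : PySem.Set.equal
      (l.foldl
        (fun (s : PySem.Set Int × PySem.Set Int) (p : Int × Int) =>
          let i' := PySem.Set.add s.2 p.2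
          let d' := if p.1 == p.2 then PySem.Set.add s.1 p.1 else s.1
          (d', i'))
        (PySem.Set.empty, PySem.Set.empty)).1
      (l.foldl
        (fun (s : PySem.Set Int × PySem.Set Int) (p : Int × Int) =>
          let i' := PySem.Set.add s.2 p.2
          let d' := if p.1 == p.2 then PySem.Set.add s.1 p.1 else s.1
          (d', i'))
        (PySem.Set.empty, PySem.Set.empty)).2
    = l.all (fun p =>
        PySem.Set.contains
          (PySem.Set.ofList ((l.filter (fun p => p.1 == p.2)).map (fun p => p.1))) p.2) := by
    rw [Bool.eq_iff_iff, PySem.Set.equal_iff, List.all_eq_true]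
    constructor
    · intro h p hp
      rw [PySem.Set.contains_iff, mem_diag]
      have := (h p.2).mpr ((hi p.2).mpr ⟨p, hp, rfl⟩)
      rw [hd] at this
      exact this
    · intro h x
      rw [hd, hi]
      constructor
      · rintro ⟨p, hp, he, rfl⟩
        exact ⟨p, hp, he ▸ rfl⟩
      · rintro ⟨p, hp, rfl⟩
        have := h p hp
        rw [PySem.Set.contains_iff, mem_diag] at this
        exact this
  rw [hcond]
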